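-- pv_equiv track=rewrite | github.com/Thehackerscrew/CrewCTF-2024-Public | challenges/ppc/count-collisions/challenge/server.py | genHash
-- ===== SOURCE A (Python) =====
-- def genHash(V):
-- 	Hash=[]
-- 	for i in range(len(V)):
-- 		Value=0
-- 		for j in range(len(V)):
-- 			if j==i and j>0:
-- 				Value-=V[j-1]
-- 				Value+=(V[j]^V[j-1])
-- 			else:
-- 				Value+=V[j]
-- 		Hash.append(Value)
-- 	return Hash
-- ===== SOURCE B (Python) =====
-- def genHash(V):
--     S = sum(V)
--     return [S if i == 0 else S - V[i] - V[i - 1] + (V[i] ^ V[i - 1])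
--             for i in range(len(V))]
-- ===== Notes on version B (the rewrite author's own statement) =====
-- stated objective: faster
-- what changed: Replaced the nested O(n^2) loops by one total sum followed by a single pass using the closed form S - V[i] - V[i-1] + (V[i]^V[i-1]) per index.
import Mathlib
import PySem

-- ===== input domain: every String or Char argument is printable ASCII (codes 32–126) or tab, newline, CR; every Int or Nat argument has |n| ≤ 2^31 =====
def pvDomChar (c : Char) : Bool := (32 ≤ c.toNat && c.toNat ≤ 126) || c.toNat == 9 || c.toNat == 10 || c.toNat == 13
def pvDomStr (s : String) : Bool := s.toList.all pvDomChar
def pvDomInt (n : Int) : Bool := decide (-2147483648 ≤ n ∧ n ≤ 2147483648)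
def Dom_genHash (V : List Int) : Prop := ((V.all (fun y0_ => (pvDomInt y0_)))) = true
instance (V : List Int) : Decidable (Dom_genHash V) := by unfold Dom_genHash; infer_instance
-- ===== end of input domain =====

-- B replaces A's nested O(n^2) loops by one total sum and a single closed-form pass (objective: faster).

-- ===== PORT A =====
def genHash (V : List Int) : List Int :=
  (PySem.List.pyRange 0 V.length 1).foldl (fun Hash i =>
    Hash ++ [(PySem.List.pyRange 0 V.length 1).foldl (fun Value j =>
      if j = i ∧ j > 0 then
        Value - PySem.List.pyGetD V (j - 1) 0
          + PySem.Int.bxor (PySem.List.pyGetD V j 0) (PySem.List.pyGetD V (j - 1) 0)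
      else
        Value + PySem.List.pyGetD V j 0) 0]) []

-- ===== PORT B =====
def genHash_alt (V : List Int) : List Int :=
  let S := V.sum
  (PySem.List.pyRange 0 V.length 1).map (fun i =>
    if i = 0 then S
    else S - PySem.List.pyGetD V i 0 - PySem.List.pyGetD V (i - 1) 0
           + PySem.Int.bxor (PySem.List.pyGetD V i 0) (PySem.List.pyGetD V (i - 1) 0))

-- ===== PRECONDITION & SPEC =====
def Spec_genHash (V : List Int) (out : List Int) : Prop := out = genHash_alt V
instance (V : List Int) (out : List Int) : Decidable (Spec_genHash V out) := by unfold Spec_genHash; infer_instance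

-- ===== CLAIM (what is proved, stated in full; the proofs are below) =====
def Claim_equal_genHash : Prop := ∀ (V : List Int), Dom_genHash V → Spec_genHash V (genHash V)

-- ===== LEMMAS AND PROOFS =====

-- A's inner-loop body as 'accumulator + per-j term'
theorem genHash_inner_step (V : List Int) (i : Int) :
    (fun (Value j : Int) =>
      if j = i ∧ j > 0 then
        Value - PySem.List.pyGetD V (j - 1) 0
          + PySem.Int.bxor (PySem.List.pyGetD V j 0) (PySem.List.pyGetD V (j - 1) 0)
      else
        Value + PySem.List.pyGetD V j 0)
    = (fun (Value j : Int) => Value +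
        (if j = i ∧ j > 0 then
          PySem.Int.bxor (PySem.List.pyGetD V j 0) (PySem.List.pyGetD V (j - 1) 0)
            - PySem.List.pyGetD V (j - 1) 0
        else PySem.List.pyGetD V j 0)) := by
  funext Value j
  split_ifs <;> ring

-- the sum of V's entries over the index range is V.sum
theorem sum_map_pyGetD (V : List Int) :
    ((PySem.List.pyRange 0 V.length 1).map (fun j => PySem.List.pyGetD V j 0)).sum = V.sum := by
  rw [PySem.List.map_pyGetD_pyRange_zero']

-- value of A's inner loop for a fixed i in range
theorem genHash_inner_value (V : List Int) (i : Int) (h0 : 0 ≤ i) (hn : i < (V.length : Int)) :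
    ((PySem.List.pyRange 0 V.length 1).foldl (fun Value j =>
      if j = i ∧ j > 0 then
        Value - PySem.List.pyGetD V (j - 1) 0
          + PySem.Int.bxor (PySem.List.pyGetD V j 0) (PySem.List.pyGetD V (j - 1) 0)
      else
        Value + PySem.List.pyGetD V j 0) 0)
    = (if i = 0 then V.sum
       else V.sum - PySem.List.pyGetD V i 0 - PySem.List.pyGetD V (i - 1) 0
              + PySem.Int.bxor (PySem.List.pyGetD V i 0) (PySem.List.pyGetD V (i - 1) 0)) := by
  rw [genHash_inner_step, PySem.List.foldl_add]
  by_cases hi : i = 0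
  · subst hi
    have : ((PySem.List.pyRange 0 V.length 1).map
        (fun j => if j = 0 ∧ j > 0 then
          PySem.Int.bxor (PySem.List.pyGetD V j 0) (PySem.List.pyGetD V (j - 1) 0)
            - PySem.List.pyGetD V (j - 1) 0
        else PySem.List.pyGetD V j 0))
        = ((PySem.List.pyRange 0 V.length 1).map (fun j => PySem.List.pyGetD V j 0)) := by
      apply List.map_congr_left
      intro j _
      have : ¬ (j = 0 ∧ j > 0) := by rintro ⟨rfl, h⟩; omega
      simp [this]
    rw [this, sum_map_pyGetD]; simp
  · rw [if_neg hi]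
    have hsplit : PySem.List.pyRange 0 V.length 1
        = PySem.List.pyRange 0 i 1 ++ PySem.List.pyRange i (i+1) 1 ++ PySem.List.pyRange (i+1) V.length 1 := by
      rw [PySem.List.pyRange_one_append 0 (i+1) (V.length) (by omega) (by omega),
          PySem.List.pyRange_one_append 0 i (i+1) (by omega) (by omega)]
    rw [hsplit]
    simp only [List.map_append, List.sum_append, PySem.List.pyRange_one_singleton, List.map_cons,
      List.map_nil, List.sum_cons, List.sum_nil]
    have hlo : ((PySem.List.pyRange 0 i 1).map
        (fun j => if j = i ∧ j > 0 then
          PySem.Int.bxor (PySem.List.pyGetD V j 0) (PySem.List.pyGetD V (j - 1) 0)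
            - PySem.List.pyGetD V (j - 1) 0
        else PySem.List.pyGetD V j 0))
        = ((PySem.List.pyRange 0 i 1).map (fun j => PySem.List.pyGetD V j 0)) := by
      apply List.map_congr_left
      intro j hj
      rw [PySem.List.mem_pyRange_one] at hj
      have : ¬ (j = i ∧ j > 0) := by rintro ⟨rfl, _⟩; omega
      simp [this]
    have hhi : ((PySem.List.pyRange (i+1) V.length 1).map
        (fun j => if j = i ∧ j > 0 then
          PySem.Int.bxor (PySem.List.pyGetD V j 0) (PySem.List.pyGetD V (j - 1) 0)
            - PySem.List.pyGetD V (j - 1) 0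
        else PySem.List.pyGetD V j 0))
        = ((PySem.List.pyRange (i+1) V.length 1).map (fun j => PySem.List.pyGetD V j 0)) := by
      apply List.map_congr_left
      intro j hj
      rw [PySem.List.mem_pyRange_one] at hj
      have : ¬ (j = i ∧ j > 0) := by rintro ⟨rfl, _⟩; omega
      simp [this]
    rw [hlo, hhi, if_pos (⟨trivial, by omega⟩ : True ∧ i > 0)]
    have hVsum : V.sum = ((PySem.List.pyRange 0 i 1).map (fun j => PySem.List.pyGetD V j 0)).sum
        + PySem.List.pyGetD V i 0
        + ((PySem.List.pyRange (i+1) V.length 1).map (fun j => PySem.List.pyGetD V j 0)).sum := by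
      rw [← sum_map_pyGetD V, hsplit]
      simp only [List.map_append, List.sum_append, PySem.List.pyRange_one_singleton, List.map_cons,
        List.map_nil, List.sum_cons, List.sum_nil]
      ring
    rw [hVsum]; ring

-- ===== VERDICT (by name: the statement is the Claim_ definition above) =====
theorem genHash_spec : Claim_equal_genHash := by
  intro V _
  unfold Spec_genHash genHash genHash_alt
  rw [PySem.List.foldl_append_singleton_eq_map]
  simp only [List.nil_append]
  apply List.map_congr_left
  intro i hi
  rw [PySem.List.mem_pyRange_one] at hi
  exact genHash_inner_value V i hi.1 hi.2
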